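-- pv_equiv track=rewrite | github.com/Jonhyog/MC521 | aula01/c.py | solve
-- ===== SOURCE A (Python) =====
-- def solve(rounds):
--     pt_count = {}
--
--     # Finds high score m
--     for (name, pt) in rounds:
--         if name not in pt_count:
--             pt_count[name] = 0
--         pt_count[name] += pt
--     m = max(pt_count.values())
--
--     # Finds winner
--     win_count = {}
--     for (name, pt) in rounds:
--         if name not in win_count:
--             win_count[name] = 0
--         win_count[name] += pt
--
--         if win_count[name] >= m and pt_count[name] == m:
--             return name
--
--     return None
-- ===== SOURCE B (Python) =====
-- def solve(rounds):
--     totals = {}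
--     for name, pt in rounds:
--         totals[name] = totals.get(name, 0) + pt
--     m = max(totals.values())
--     # Backward scan with per-name suffix sums: cumulative(i) >= m  <=>  suffix-after(i) <= 0
--     # when totals[name] == m; the last qualifying position seen (smallest index) wins.
--     suffix = {}
--     winner = None
--     for name, pt in reversed(rounds):
--         if totals[name] == m and suffix.get(name, 0) <= 0:
--             winner = name
--         suffix[name] = suffix.get(name, 0) + pt
--     return winner
-- ===== Notes on version B (the rewrite author's own statement) =====
-- stated objective: alternative
-- what changed: A scans forward maintaining running cumulative scores and early-returns at the first name whose cumulative reaches the max total; B never tracks forward cumulatives: after the totals pass it scans the rounds in REVERSE maintaining per-name suffix sums, using cumulative>=m <=> suffix-after<=0 (for names with total==m), and keeps overwriting the winner so the smallest qualifying index survives.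
import Mathlib
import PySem

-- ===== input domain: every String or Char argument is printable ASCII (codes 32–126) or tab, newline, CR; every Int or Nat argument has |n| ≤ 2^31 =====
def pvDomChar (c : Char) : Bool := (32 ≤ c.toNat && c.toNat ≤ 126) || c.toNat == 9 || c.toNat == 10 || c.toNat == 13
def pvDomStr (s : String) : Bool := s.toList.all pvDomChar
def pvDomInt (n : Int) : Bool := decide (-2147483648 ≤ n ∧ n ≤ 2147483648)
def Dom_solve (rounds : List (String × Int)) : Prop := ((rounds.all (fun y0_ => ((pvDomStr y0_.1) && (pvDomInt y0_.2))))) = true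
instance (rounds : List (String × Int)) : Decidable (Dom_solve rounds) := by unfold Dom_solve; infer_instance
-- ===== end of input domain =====

-- B replaces A's forward early-return scan over running cumulatives by a REVERSE scan over per-name
-- suffix sums (cumulative >= m  <=>  suffix-after <= 0 for a name with total = m), overwriting the
-- winner so the earliest qualifying round survives. Objective: alternative decomposition, same cost.

-- ===== PORT A =====
-- the two Python statements 'if name not in d: d[name] = 0' ; 'd[name] += pt'
-- (the read d[name] is total here: the key was just ensured present)
def solveCountStep (d : PySem.Dict String Int) (p : String × Int) : PySem.Dict String Int :=
  let d1 := if d.contains p.1 then d else d.insert p.1 0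
  d1.insert p.1 (d1.getD p.1 0 + p.2)

-- A's second loop with its early 'return name'
def solveWinLoop (m : Int) (pt : PySem.Dict String Int) (wc : PySem.Dict String Int) :
    List (String × Int) → Option String
  | [] => none
  | p :: rest =>
    let wc' := solveCountStep wc p
    if m ≤ wc'.getD p.1 0 ∧ pt.getD p.1 0 = m then some p.1
    else solveWinLoop m pt wc' rest

def solve (rounds : List (String × Int)) : Option String :=
  let pt := rounds.foldl solveCountStep PySem.Dict.empty
  match PySem.List.max? pt.values (fun v => v) with
  | none => none  -- Python: max([]) raises ValueError here; rounds = [] is excluded by Pre_solve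
  | some m => solveWinLoop m pt PySem.Dict.empty rounds

-- ===== PORT B =====
-- totals[name] = totals.get(name, 0) + pt
def solveAltStep (d : PySem.Dict String Int) (p : String × Int) : PySem.Dict String Int :=
  d.insert p.1 (d.getD p.1 0 + p.2)

-- body of B's 'for name, pt in reversed(rounds)' loop: check (with the suffix sums seen so far,
-- i.e. of the rounds AFTER this one), then add this round's points to the suffix dict.
-- totals[name] is a total read here (name is a key of totals): ported as getD.
def solveSufStep (totals : PySem.Dict String Int) (m : Int)
    (s : PySem.Dict String Int × Option String) (p : String × Int) :
    PySem.Dict String Int × Option String :=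
  let w := if totals.getD p.1 0 = m ∧ s.1.getD p.1 0 ≤ 0 then some p.1 else s.2
  (s.1.insert p.1 (s.1.getD p.1 0 + p.2), w)

def solve_alt (rounds : List (String × Int)) : Option String :=
  let totals := rounds.foldl solveAltStep PySem.Dict.empty
  match PySem.List.max? totals.values (fun v => v) with
  | none => none  -- Python: max([]) raises ValueError here; outside Pre_solve
  | some m => (rounds.reverse.foldl (solveSufStep totals m) (PySem.Dict.empty, none)).2

-- ===== PRECONDITION & SPEC =====
-- rounds = [] is excluded: there Python A raises ValueError (max of an empty dict's values)
def Pre_solve (rounds : List (String × Int)) : Prop := rounds ≠ []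
instance (rounds : List (String × Int)) : Decidable (Pre_solve rounds) := by unfold Pre_solve; infer_instance
def pvWitness_solve : (List (String × Int)) := [("a", 1)]

def Spec_solve (rounds : List (String × Int)) (out : Option String) : Prop := out = solve_alt rounds
instance (rounds : List (String × Int)) (out : Option String) : Decidable (Spec_solve rounds out) := by unfold Spec_solve; infer_instance

-- ===== CLAIM =====
def Claim_equal_solve : Prop := ∀ (rounds : List (String × Int)), Dom_solve rounds → Pre_solve rounds → Spec_solve rounds (solve rounds)

-- ===== LEMMAS AND PROOFS =====

theorem dictExt {κ ν : Type} (d e : PySem.Dict κ ν) (h : d.items = e.items) : d = e := by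
  cases d; cases e; simpa using h

theorem insert_zero_insert (d : PySem.Dict String Int) (k : String) (v : Int)
    (h : d.contains k = false) : (d.insert k 0).insert k v = d.insert k v := by
  have hall : ∀ q ∈ d.items, (q.1 == k) = false := by
    intro q hq
    by_contra hc
    have : d.contains k = true := by
      simp only [PySem.Dict.contains, List.any_eq_true]
      exact ⟨q, hq, by simpa using hc⟩
    simp [this] at h
  have h1 : (d.insert k 0).items = d.items ++ [(k, (0:Int))] :=
    PySem.Dict.items_insert_of_not_contains d 0 h
  have h2 : (d.insert k 0).contains k = true := by
    simp [PySem.Dict.contains, h1]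
  apply dictExt
  rw [PySem.Dict.items_insert_of_contains _ v h2, h1,
      PySem.Dict.items_insert_of_not_contains d v h, List.map_append]
  congr 1
  · calc List.map (fun p => if (p.1 == k) = true then (k, v) else p) d.items
          = List.map id d.items := List.map_congr_left (fun q hq => by simp [hall q hq])
      _ = d.items := List.map_id _
  · simp

theorem step_eq (d : PySem.Dict String Int) (p : String × Int) :
    solveCountStep d p = solveAltStep d p := by
  unfold solveCountStep solveAltStep
  by_cases h : d.contains p.1 = true
  · simp [h]
  · have h' : d.contains p.1 = false := by simpa using h
    simp only [h', Bool.false_eq_true, if_false]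
    rw [PySem.Dict.getD_insert_self, PySem.Dict.getD_of_not_contains d 0 h', zero_add,
        insert_zero_insert d p.1 p.2 h']

theorem stepfun_eq : solveCountStep = solveAltStep :=
  funext fun d => funext fun p => step_eq d p

-- sum of the points of name n in a list of rounds
def sumOf (n : String) : List (String × Int) → Int
  | [] => 0
  | p :: rest => (if p.1 = n then p.2 else 0) + sumOf n rest

-- the totals fold computes sumOf (pointwise, via getD)
theorem getD_foldl_sum (l : List (String × Int)) (d : PySem.Dict String Int) (n : String) :
    (l.foldl solveAltStep d).getD n 0 = d.getD n 0 + sumOf n l := by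
  induction l generalizing d with
  | nil => simp [sumOf]
  | cons p rest ih =>
    rw [List.foldl_cons, ih, sumOf]
    unfold solveAltStep
    rw [PySem.Dict.getD_insert]
    by_cases h : n = p.1
    · subst h; simp; ring
    · rw [if_neg h, if_neg (fun hh => h hh.symm)]; ring

-- the (round-ordered) list of names at qualifying positions, stated via A's running cumulative
def qualList (m : Int) (pt : PySem.Dict String Int) (cum : PySem.Dict String Int) :
    List (String × Int) → List String
  | [] => []
  | p :: rest =>
    let cum' := solveAltStep cum p
    (if m ≤ cum'.getD p.1 0 ∧ pt.getD p.1 0 = m then [p.1] else []) ++ qualList m pt cum' rest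

-- the same list stated via suffix sums (B's view)
def qualB (totals : PySem.Dict String Int) (m : Int) : List (String × Int) → List String
  | [] => []
  | p :: rest =>
    (if totals.getD p.1 0 = m ∧ sumOf p.1 rest ≤ 0 then [p.1] else []) ++ qualB totals m rest

-- A's early-return loop returns the head of the qualifying list
theorem winLoop_eq_head (m : Int) (pt : PySem.Dict String Int) (l : List (String × Int))
    (wc : PySem.Dict String Int) :
    solveWinLoop m pt wc l = (qualList m pt wc l).head? := by
  induction l generalizing wc with
  | nil => rfl
  | cons p rest ih =>
    simp only [solveWinLoop, qualList, step_eq]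
    split_ifs with h
    · rfl
    · simpa using ih _

-- cumulative-so-far + suffix-to-come = total: the two qualifying conditions agree
theorem qualList_eq_qualB (m : Int) (pt : PySem.Dict String Int) (l : List (String × Int))
    (cum : PySem.Dict String Int)
    (hinv : ∀ n, cum.getD n 0 + sumOf n l = pt.getD n 0) :
    qualList m pt cum l = qualB pt m l := by
  induction l generalizing cum with
  | nil => rfl
  | cons p rest ih =>
    have hcum : (solveAltStep cum p).getD p.1 0 = cum.getD p.1 0 + p.2 := by
      unfold solveAltStep; rw [PySem.Dict.getD_insert_self]
    have hp := hinv p.1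
    rw [sumOf, if_pos rfl] at hp
    simp only [qualList, qualB]
    congr 1
    · have : (m ≤ (solveAltStep cum p).getD p.1 0 ∧ pt.getD p.1 0 = m)
           ↔ (pt.getD p.1 0 = m ∧ sumOf p.1 rest ≤ 0) := by
        rw [hcum]; constructor <;> (rintro ⟨h1, h2⟩; constructor <;> omega)
      by_cases h : pt.getD p.1 0 = m ∧ sumOf p.1 rest ≤ 0
      · rw [if_pos (this.mpr h), if_pos h]
      · rw [if_neg (fun hh => h (this.mp hh)), if_neg h]
    · apply ih
      intro n
      unfold solveAltStep
      rw [PySem.Dict.getD_insert]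
      have hn := hinv n
      rw [sumOf] at hn
      by_cases h : n = p.1
      · subst h
        rw [if_pos rfl] at hn ⊢
        omega
      · rw [if_neg h]
        rw [if_neg (fun hh => h hh.symm)] at hn
        omega

theorem sufStep_fst (t : PySem.Dict String Int) (m : Int)
    (s : PySem.Dict String Int × Option String) (p : String × Int) :
    (solveSufStep t m s p).1 = s.1.insert p.1 (s.1.getD p.1 0 + p.2) := rfl

theorem sufStep_snd (t : PySem.Dict String Int) (m : Int)
    (s : PySem.Dict String Int × Option String) (p : String × Int) :
    (solveSufStep t m s p).2 = if t.getD p.1 0 = m ∧ s.1.getD p.1 0 ≤ 0 then some p.1 else s.2 := rfl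

-- B's reversed fold, written as a foldr: its suffix dict holds sumOf, its winner is qualB's head
theorem bFoldr_spec (totals : PySem.Dict String Int) (m : Int) (l : List (String × Int)) :
    (∀ n, (l.foldr (fun p s => solveSufStep totals m s p) (PySem.Dict.empty, none)).1.getD n 0
          = sumOf n l)
    ∧ (l.foldr (fun p s => solveSufStep totals m s p) (PySem.Dict.empty, none)).2
      = (qualB totals m l).head? := by
  induction l with
  | nil => exact ⟨fun n => by simp [sumOf, PySem.Dict.getD_empty], rfl⟩
  | cons p rest ih =>
    obtain ⟨ih1, ih2⟩ := ih
    constructor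
    · intro n
      rw [List.foldr_cons, sufStep_fst, PySem.Dict.getD_insert, sumOf]
      by_cases h : n = p.1
      · subst h; rw [if_pos rfl, if_pos rfl, ih1]; ring
      · rw [if_neg h, if_neg (fun hh => h hh.symm), ih1]; ring
    · rw [List.foldr_cons, sufStep_snd, qualB, ih1]
      by_cases h : totals.getD p.1 0 = m ∧ sumOf p.1 rest ≤ 0
      · rw [if_pos h, if_pos h]; rfl
      · rw [if_neg h, if_neg h, List.nil_append, ih2]

-- ===== VERDICT =====
theorem solve_spec : Claim_equal_solve := by
  intro rounds _ _
  unfold Spec_solve solve solve_alt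
  rw [stepfun_eq]
  cases hmax : PySem.List.max? ((rounds.foldl solveAltStep PySem.Dict.empty).values) (fun v => v) with
  | none => simp [hmax]
  | some m =>
    simp only [hmax]
    rw [List.foldl_reverse]
    have hB := bFoldr_spec (rounds.foldl solveAltStep PySem.Dict.empty) m rounds
    have hfold : (fun (x : String × Int) (y : PySem.Dict String Int × Option String) =>
        solveSufStep (rounds.foldl solveAltStep PySem.Dict.empty) m y x)
        = (fun p s => solveSufStep (rounds.foldl solveAltStep PySem.Dict.empty) m s p) := rfl
    rw [hfold, hB.2, winLoop_eq_head, qualList_eq_qualB]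
    intro n
    rw [getD_foldl_sum, PySem.Dict.getD_empty]
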